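-- pv_equiv track=rewrite | github.com/yrnana/algorithm | challenge/e200317.py | solution
-- ===== SOURCE A (Python) =====
-- def solution(rule, A, B):
--     if A == B:
--         return rule[0]
--     base = len(rule)  # 진법
--     m1, m2 = dict(), dict()
--     for i, r in enumerate(rule):
--         m1[r] = i  # alpha -> digit
--         m2[i] = r  # digit -> alpha
--
--     a, an = 0, 1
--     for i in range(len(A) - 1, -1, -1):
--         a += m1[A[i]] * an
--         an *= base
--     b, bn = 0, 1
--     for i in range(len(B) - 1, -1, -1):
--         b += m1[B[i]] * bn
--         bn *= base
--
--     num = a - b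
--     ans = ''
--     while num > 0:
--         ans = m2[num % base] + ans
--         num //= base
--     return ans
-- ===== SOURCE B (Python) =====
-- def solution(rule, A, B):
--     if A == B:
--         return rule[0]
--     base = len(rule)
--     val = {}
--     for i, r in enumerate(rule):
--         val[r] = i
--     da = [val[c] for c in A]
--     db = [val[c] for c in B]
--     # strip leading zero digits so lengths compare magnitudes
--     while da and da[0] == 0:
--         da = da[1:]
--     while db and db[0] == 0:
--         db = db[1:]
--     if len(da) < len(db) or (len(da) == len(db) and da <= db):
--         return ''
--     db = [0] * (len(da) - len(db)) + db
--     res = []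
--     borrow = 0
--     for x, y in zip(reversed(da), reversed(db)):
--         d = x - y - borrow
--         borrow = 1 if d < 0 else 0
--         res.append(d + base if d < 0 else d)
--     res.reverse()
--     while res and res[0] == 0:
--         res = res[1:]
--     return ''.join(rule[d] for d in res)
-- ===== Notes on version B (the rewrite author's own statement) =====
-- stated objective: alternative
-- what changed: Replaces big-integer conversion (Horner evaluation of both strings, integer subtraction, then repeated divmod re-encoding) by schoolbook columnar subtraction: digit lists, leading-zero stripping, a (length, lexicographic) magnitude comparison that yields '' when A <= B, a right-to-left borrow pass over the padded digit lists, and a final zero-strip-and-join, using only small per-digit integers.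
import Mathlib
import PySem

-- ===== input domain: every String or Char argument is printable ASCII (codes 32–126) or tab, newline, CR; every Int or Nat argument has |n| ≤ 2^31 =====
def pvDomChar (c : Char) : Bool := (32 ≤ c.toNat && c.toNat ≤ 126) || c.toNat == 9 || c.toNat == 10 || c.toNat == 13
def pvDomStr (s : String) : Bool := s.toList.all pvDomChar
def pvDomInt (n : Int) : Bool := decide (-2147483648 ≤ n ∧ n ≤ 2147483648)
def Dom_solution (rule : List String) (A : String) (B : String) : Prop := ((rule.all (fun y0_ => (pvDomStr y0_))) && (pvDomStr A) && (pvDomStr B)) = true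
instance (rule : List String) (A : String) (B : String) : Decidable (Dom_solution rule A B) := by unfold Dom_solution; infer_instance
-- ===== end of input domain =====

-- B replaces integer conversion by columnar digit subtraction with borrow (one left-to-right digit pass); objective: alternative algorithm of linear digit work.


-- ===== PORT A =====
-- A's while loop, with fuel num.toNat (enough: num strictly decreases while positive, see proofs)
def solutionWhile (m2 : PySem.Dict Int String) (base : Int) : Nat → Int → String → String
  | 0, _, ans => ans
  | fuel+1, num, ans =>
    if num > 0 then
      solutionWhile m2 base fuel (PySem.Int.floordiv num base)
        (m2.getD (PySem.Int.mod num base) "" ++ ans)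
    else ans

def solution (rule : List String) (A : String) (B : String) : String :=
  if A == B then (PySem.List.pyGet? rule 0).getD "" else   -- rule[0]; none = IndexError, excluded by Pre_
  let base : Int := (rule.length : Int)
  let m := (PySem.List.enumerate rule).foldl
      (fun (p : PySem.Dict String Int × PySem.Dict Int String) ir =>
        (p.1.insert ir.2 ir.1, p.2.insert ir.1 ir.2)) (PySem.Dict.empty, PySem.Dict.empty)
  -- m1[A[i]] / m1[B[i]]: a missing key is KeyError, excluded by Pre_ (getD defaults are never reached there)
  let pa := (PySem.List.pyRange ((PySem.Str.len A) - 1) (-1) (-1)).foldl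
      (fun (s : Int × Int) i =>
        (s.1 + m.1.getD (String.ofList [((PySem.Str.pyGet? A i).getD ' ')]) 0 * s.2, s.2 * base)) (0, 1)
  let pb := (PySem.List.pyRange ((PySem.Str.len B) - 1) (-1) (-1)).foldl
      (fun (s : Int × Int) i =>
        (s.1 + m.1.getD (String.ofList [((PySem.Str.pyGet? B i).getD ' ')]) 0 * s.2, s.2 * base)) (0, 1)
  let num := pa.1 - pb.1
  solutionWhile m.2 base num.toNat num ""

-- ===== PORT B =====
-- 'while l and l[0] == 0: l = l[1:]'
def altDropZeros : List Int → List Int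
  | [] => []
  | d :: t => if d == 0 then altDropZeros t else d :: t

-- Python's lexicographic 'da <= db' on int lists
def altLexLe : List Int → List Int → Bool
  | [], _ => true
  | _ :: _, [] => false
  | x :: xs, y :: ys => if x < y then true else if y < x then false else altLexLe xs ys

def solution_alt (rule : List String) (A : String) (B : String) : String :=
  if A == B then (PySem.List.pyGet? rule 0).getD "" else   -- rule[0]
  let base : Int := (rule.length : Int)
  let val := (PySem.List.enumerate rule).foldl
      (fun (d : PySem.Dict String Int) ir => d.insert ir.2 ir.1) PySem.Dict.empty
  -- val[c]: KeyError excluded by Pre_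
  let da := altDropZeros (A.toList.map (fun c => val.getD (String.ofList [c]) 0))
  let db := altDropZeros (B.toList.map (fun c => val.getD (String.ofList [c]) 0))
  if da.length < db.length || (da.length == db.length && altLexLe da db) then "" else
  let db2 := List.replicate (da.length - db.length) (0 : Int) ++ db
  let p := (da.reverse.zip db2.reverse).foldl
      (fun (s : List Int × Int) xy =>
        let d := xy.1 - xy.2 - s.2
        (s.1 ++ [if d < 0 then d + base else d], if d < 0 then (1:Int) else 0)) ([], 0)
  let res := altDropZeros p.1.reverse
  PySem.Str.join "" (res.map (fun d => (PySem.List.pyGet? rule d).getD ""))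

-- ===== PRECONDITION & SPEC =====
-- Pre_ excludes exactly the inputs where A raises: rule = [] with A = B (IndexError on rule[0]),
-- and, when A ≠ B, any character of A or B whose singleton string is not a rule symbol (KeyError).
def Pre_solution (rule : List String) (A : String) (B : String) : Prop :=
  rule ≠ [] ∧ (A = B ∨
    (A.toList.all (fun c => (rule.map String.toList).contains [c]) = true ∧
     B.toList.all (fun c => (rule.map String.toList).contains [c]) = true))
instance (rule : List String) (A : String) (B : String) : Decidable (Pre_solution rule A B) := by unfold Pre_solution; infer_instance

def pvWitness_solution : List String × String × String := (["0", "1", "2"], "210", "12")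

def Spec_solution (rule : List String) (A : String) (B : String) (out : String) : Prop := out = solution_alt rule A B
instance (rule : List String) (A : String) (B : String) (out : String) : Decidable (Spec_solution rule A B out) := by unfold Spec_solution; infer_instance

-- ===== CLAIM (what is proved, stated in full; the proofs are below) =====
def Claim_equal_solution : Prop := ∀ (rule : List String) (A : String) (B : String), Dom_solution rule A B → Pre_solution rule A B → Spec_solution rule A B (solution rule A B)

-- ===== LEMMAS AND PROOFS =====

-- value of a digit list, most-significant first (Horner), and least-significant first
def nuv (base : Int) (ds : List Int) : Int := ds.foldl (fun a d => a * base + d) 0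

def muv (base : Int) : List Int → Int
  | [] => 0
  | d :: t => d + base * muv base t

theorem nuv_append (base : Int) (l : List Int) (d : Int) :
    nuv base (l ++ [d]) = nuv base l * base + d := by
  simp [nuv, List.foldl_append]

theorem nuv_reverse (base : Int) (l : List Int) : nuv base l.reverse = muv base l := by
  induction l with
  | nil => rfl
  | cons d t ih => simp [nuv_append, muv, ih]; ring

theorem muv_reverse (base : Int) (l : List Int) : muv base l.reverse = nuv base l := by
  have := nuv_reverse base l.reverse
  simpa using this.symm

theorem muv_append (base : Int) (l : List Int) (d : Int) :
    muv base (l ++ [d]) = muv base l + d * base ^ l.length := by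
  induction l with
  | nil => simp [muv]
  | cons x t ih => simp [muv, ih]; ring

theorem muv_bounds (base : Int) (l : List Int) (h : ∀ d ∈ l, 0 ≤ d ∧ d < base) :
    0 ≤ muv base l ∧ muv base l < base ^ l.length := by
  induction l with
  | nil => simp [muv]
  | cons d t ih =>
    obtain ⟨hd0, hdb⟩ := h d (by simp)
    obtain ⟨ih0, ih1⟩ := ih (fun x hx => h x (by simp [hx]))
    have hb : 0 < base := lt_of_le_of_lt hd0 hdb
    constructor
    · simp [muv]; nlinarith
    · have : base ^ (d :: t).length = base * base ^ t.length := by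
        simp [pow_succ]; ring
      simp only [muv, this]
      nlinarith

theorem nuv_bounds (base : Int) (l : List Int) (h : ∀ d ∈ l, 0 ≤ d ∧ d < base) :
    0 ≤ nuv base l ∧ nuv base l < base ^ l.length := by
  have := muv_bounds base l.reverse (fun d hd => h d (by simpa using hd))
  rw [muv_reverse] at this
  simpa using this

theorem nuv_cons (base : Int) (d : Int) (t : List Int) :
    nuv base (d :: t) = d * base ^ t.length + nuv base t := by
  rw [← muv_reverse base (d :: t)]
  have : (d :: t).reverse = t.reverse ++ [d] := by simp
  rw [this, muv_append, muv_reverse]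
  simp [add_comm]

theorem pow_le_nuv (base : Int) (d : Int) (t : List Int) (hd : 1 ≤ d)
    (h : ∀ x ∈ t, 0 ≤ x ∧ x < base) (hb : 0 < base) : base ^ t.length ≤ nuv base (d :: t) := by
  have h0 := (nuv_bounds base t h).1
  have hp : (0:Int) ≤ base ^ t.length := pow_nonneg (le_of_lt hb) _
  rw [nuv_cons]; nlinarith

theorem nuv_zero_cons (base : Int) (t : List Int) : nuv base ((0:Int) :: t) = nuv base t := by
  simp [nuv]

theorem dropZeros_sub (l : List Int) : ∀ d ∈ altDropZeros l, d ∈ l := by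
  induction l with
  | nil => simp [altDropZeros]
  | cons d t ih =>
    intro x hx
    by_cases h : d = 0
    · simp only [altDropZeros, h] at hx
      simp at hx
      exact List.mem_cons_of_mem _ (ih x hx)
    · simp only [altDropZeros] at hx
      rw [if_neg (by simpa using h)] at hx
      exact hx

theorem dropZeros_head (l : List Int) :
    altDropZeros l = [] ∨ ∃ d t, altDropZeros l = d :: t ∧ d ≠ 0 := by
  induction l with
  | nil => left; rfl
  | cons d t ih =>
    by_cases h : d = 0
    · simpa [altDropZeros, h] using ih
    · right
      exact ⟨d, t, by simp [altDropZeros, h], h⟩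

theorem dropZeros_eq_nil_iff (l : List Int) : altDropZeros l = [] ↔ ∀ d ∈ l, d = 0 := by
  induction l with
  | nil => simp [altDropZeros]
  | cons d t ih =>
    by_cases h : d = 0
    · simp [altDropZeros, h, ih]
    · simp [altDropZeros, h]

theorem nuv_dropZeros (base : Int) (l : List Int) : nuv base (altDropZeros l) = nuv base l := by
  induction l with
  | nil => rfl
  | cons d t ih =>
    by_cases h : d = 0
    · rw [h, nuv_zero_cons, ← ih]
      simp [altDropZeros]
    · simp [altDropZeros, h]

theorem nuv_replicate_zero (base : Int) (k : Nat) (l : List Int) :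
    nuv base (List.replicate k 0 ++ l) = nuv base l := by
  induction k with
  | zero => simp
  | succ n ih => rw [List.replicate_succ, List.cons_append, nuv_zero_cons, ih]

theorem nuv_eq_zero_iff (base : Int) (l : List Int) (hb : 0 < base)
    (h : ∀ d ∈ l, 0 ≤ d ∧ d < base) : nuv base l = 0 ↔ ∀ d ∈ l, d = 0 := by
  induction l with
  | nil => simp [nuv]
  | cons d t ih =>
    obtain ⟨hd0, hdb⟩ := h d (by simp)
    have ht := fun x hx => h x (List.mem_cons_of_mem _ hx)
    have h0 := (nuv_bounds base t ht).1
    have hp : (0:Int) < base ^ t.length := pow_pos hb _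
    rw [nuv_cons]
    constructor
    · intro hz
      have hd : d = 0 := by nlinarith
      have : nuv base t = 0 := by nlinarith
      intro x hx
      rcases List.mem_cons.mp hx with rfl | hx
      · exact hd
      · exact ((ih ht).mp this) x hx
    · intro hz
      have hd : d = 0 := hz d (by simp)
      have : nuv base t = 0 := (ih ht).mpr (fun x hx => hz x (List.mem_cons_of_mem _ hx))
      rw [hd, this]; ring

-- Python's list ≤ decides value order on equal-length bounded digit lists
theorem lexLe_iff (base : Int) : ∀ (xs ys : List Int), xs.length = ys.length →
    (∀ d ∈ xs, 0 ≤ d ∧ d < base) → (∀ d ∈ ys, 0 ≤ d ∧ d < base) →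
    (altLexLe xs ys = true ↔ nuv base xs ≤ nuv base ys) := by
  intro xs
  induction xs with
  | nil =>
    intro ys hlen _ _
    have : ys = [] := by simpa using (List.length_eq_zero_iff.mp hlen.symm)
    simp [this, altLexLe]
  | cons x xs' ih =>
    intro ys hlen hx hy
    cases ys with
    | nil => simp at hlen
    | cons y ys' =>
      obtain ⟨hx0, hxb⟩ := hx x (by simp)
      obtain ⟨hy0, hyb⟩ := hy y (by simp)
      have hb : 0 < base := lt_of_le_of_lt hx0 hxb
      have hlen' : xs'.length = ys'.length := by simpa using hlen
      have hx' := fun d hd => hx d (List.mem_cons_of_mem _ hd)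
      have hy' := fun d hd => hy d (List.mem_cons_of_mem _ hd)
      obtain ⟨hxs0, hxs1⟩ := nuv_bounds base xs' hx'
      obtain ⟨hys0, hys1⟩ := nuv_bounds base ys' hy'
      rw [← hlen'] at hys1
      rw [nuv_cons, nuv_cons, ← hlen']
      have hpow := pow_pos hb xs'.length
      by_cases h1 : x < y
      · simp only [altLexLe, if_pos h1]
        constructor
        · intro _; nlinarith
        · intro _; trivial
      · by_cases h2 : y < x
        · simp only [altLexLe, if_neg h1, if_pos h2]
          constructor
          · intro h; simp at h
          · intro h; exfalso
            have hkey := mul_le_mul_of_nonneg_right (show y + 1 ≤ x by omega) (le_of_lt hpow)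
            rw [add_mul, one_mul] at hkey
            linarith
        · have hxy : x = y := le_antisymm (not_lt.mp h2) (not_lt.mp h1)
          simp only [altLexLe, if_neg h1, if_neg h2]
          rw [hxy]
          rw [ih ys' hlen' hx' hy']
          constructor <;> intro h <;> nlinarith

-- the full guard of B decides num ≤ 0, for canonical (no leading zero) digit lists
theorem guard_iff (base : Int) (hb : 0 < base) (xs ys : List Int)
    (hx : ∀ d ∈ xs, 0 ≤ d ∧ d < base) (hy : ∀ d ∈ ys, 0 ≤ d ∧ d < base)
    (cx : xs = [] ∨ ∃ d t, xs = d :: t ∧ d ≠ 0) (cy : ys = [] ∨ ∃ d t, ys = d :: t ∧ d ≠ 0) :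
    ((xs.length < ys.length || (xs.length == ys.length && altLexLe xs ys)) = true
      ↔ nuv base xs ≤ nuv base ys) := by
  obtain ⟨hxs0, hxs1⟩ := nuv_bounds base xs hx
  obtain ⟨hys0, hys1⟩ := nuv_bounds base ys hy
  have hb1 : (1:Int) ≤ base := hb
  rcases lt_trichotomy xs.length ys.length with hl | hl | hl
  · obtain cy | ⟨d, t, hyt, hd⟩ := cy
    · subst cy; simp at hl
    · have hd1 : 1 ≤ d := by
        obtain ⟨hd0, _⟩ := hy d (by rw [hyt]; simp)
        omega
      have hle : base ^ xs.length ≤ base ^ t.length := by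
        apply pow_le_pow_right₀ hb1
        have : ys.length = t.length + 1 := by rw [hyt]; simp
        omega
      have := pow_le_nuv base d t hd1 (fun z hz => hy z (by rw [hyt]; exact List.mem_cons_of_mem _ hz)) hb
      rw [← hyt] at this
      simp only [hl, decide_true, Bool.true_or]
      constructor
      · intro _; linarith
      · intro _; trivial
  · have heq : (decide (xs.length < ys.length)) = false := by simp [hl]
    have heq2 : (xs.length == ys.length) = true := by simp [hl]
    rw [heq, heq2]
    simp only [Bool.false_or, Bool.true_and]
    exact lexLe_iff base xs ys hl hx hy
  · obtain cx | ⟨d, t, hxt, hd⟩ := cx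
    · subst cx; simp at hl
    · have hd1 : 1 ≤ d := by
        obtain ⟨hd0, _⟩ := hx d (by rw [hxt]; simp)
        omega
      have hle : base ^ ys.length ≤ base ^ t.length := by
        apply pow_le_pow_right₀ hb1
        have : xs.length = t.length + 1 := by rw [hxt]; simp
        omega
      have := pow_le_nuv base d t hd1 (fun z hz => hx z (by rw [hxt]; exact List.mem_cons_of_mem _ hz)) hb
      rw [← hxt] at this
      have hne : (xs.length == ys.length) = false := by simp; omega
      have hnlt : (decide (xs.length < ys.length)) = false := by simp; omega
      simp only [hne, hnlt, Bool.false_and, Bool.false_or]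
      constructor
      · intro h; simp at h
      · intro h; exfalso; linarith

-- LSB-first specification of B's borrow loop
def subSpec (base : Int) : List (Int × Int) → Int → List Int × Int
  | [], b => ([], b)
  | (x, y) :: t, b =>
    let d := x - y - b
    let r := subSpec base t (if d < 0 then 1 else 0)
    ((if d < 0 then d + base else d) :: r.1, r.2)

theorem fold_eq_subSpec (base : Int) : ∀ (zs : List (Int × Int)) (acc : List Int) (bIn : Int),
    zs.foldl (fun (s : List Int × Int) xy =>
        let d := xy.1 - xy.2 - s.2
        (s.1 ++ [if d < 0 then d + base else d], if d < 0 then (1:Int) else 0)) (acc, bIn)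
      = (acc ++ (subSpec base zs bIn).1, (subSpec base zs bIn).2) := by
  intro zs
  induction zs with
  | nil => intro acc bIn; simp [subSpec]
  | cons p t ih =>
    intro acc bIn
    obtain ⟨x, y⟩ := p
    simp only [List.foldl_cons, subSpec, ih]
    simp

theorem subSpec_props (base : Int) : ∀ (zs : List (Int × Int)) (bIn : Int),
    (bIn = 0 ∨ bIn = 1) →
    (∀ p ∈ zs, (0 ≤ p.1 ∧ p.1 < base) ∧ (0 ≤ p.2 ∧ p.2 < base)) →
    (∀ d ∈ (subSpec base zs bIn).1, 0 ≤ d ∧ d < base) ∧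
    ((subSpec base zs bIn).2 = 0 ∨ (subSpec base zs bIn).2 = 1) ∧
    (subSpec base zs bIn).1.length = zs.length ∧
    muv base (subSpec base zs bIn).1
      = muv base (zs.map (·.1)) - muv base (zs.map (·.2)) - bIn
        + (subSpec base zs bIn).2 * base ^ zs.length := by
  intro zs
  induction zs with
  | nil =>
    intro bIn hbIn _
    refine ⟨by simp [subSpec], by simpa [subSpec] using hbIn, by simp [subSpec], ?_⟩
    simp [subSpec, muv]
  | cons p t ih =>
    intro bIn hbIn hB
    obtain ⟨x, y⟩ := p
    obtain ⟨⟨hx0, hx1⟩, hy0, hy1⟩ := hB (x, y) (by simp)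
    have hB' := fun q hq => hB q (List.mem_cons_of_mem _ hq)
    have hb : 0 < base := lt_of_le_of_lt hx0 hx1
    by_cases hd : x - y - bIn < 0
    · obtain ⟨ih1, ih2, ih3, ih4⟩ := ih 1 (Or.inr rfl) hB'
      simp only [subSpec, if_pos hd]
      refine ⟨?_, ih2, by simpa using ih3, ?_⟩
      · intro z hz
        rcases List.mem_cons.mp hz with rfl | hz
        · constructor <;> omega
        · exact ih1 z hz
      · simp only [List.map_cons, muv, List.length_cons, pow_succ, ih4]
        ring
    · obtain ⟨ih1, ih2, ih3, ih4⟩ := ih 0 (Or.inl rfl) hB'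
      simp only [subSpec, if_neg hd]
      refine ⟨?_, ih2, by simpa using ih3, ?_⟩
      · intro z hz
        rcases List.mem_cons.mp hz with rfl | hz
        · constructor <;> omega
        · exact ih1 z hz
      · simp only [List.map_cons, muv, List.length_cons, pow_succ, ih4]
        ring

-- joining with "" appends
theorem join_nil_flatten (ls : List (List Char)) : PySem.Chars.join [] ls = ls.flatten := by
  induction ls with
  | nil => simp [PySem.Chars.join_nil]
  | cons p rest ih =>
    cases rest with
    | nil => simp [PySem.Chars.join_singleton]
    | cons q r =>
      rw [PySem.Chars.join_cons_cons]
      rw [ih]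
      simp

theorem join_nil_append (parts : List String) (s : String) :
    PySem.Str.join "" (parts ++ [s]) = PySem.Str.join "" parts ++ s := by
  apply String.ext
  simp [PySem.Str.join, join_nil_flatten]

theorem dropZeros_append (l : List Int) (d : Int) :
    altDropZeros (l ++ [d])
      = if altDropZeros l = [] then altDropZeros [d] else altDropZeros l ++ [d] := by
  induction l with
  | nil => simp [altDropZeros]
  | cons x t ih =>
    by_cases h : x = 0
    · simpa [altDropZeros, h] using ih
    · simp [altDropZeros, h]

theorem join_nil_nil : PySem.Str.join "" ([] : List String) = "" := by
  apply String.ext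
  simp [PySem.Str.join]

theorem join_nil_singleton (s : String) : PySem.Str.join "" [s] = s := by
  have := join_nil_append [] s
  simpa [join_nil_nil] using this

theorem solutionWhile_zero (m2 : PySem.Dict Int String) (base : Int) (num : Int) (ans : String) :
    solutionWhile m2 base 0 num ans = ans := rfl

theorem solutionWhile_succ (m2 : PySem.Dict Int String) (base : Int) (f : Nat) (num : Int) (ans : String) :
    solutionWhile m2 base (f + 1) num ans
      = if num > 0 then
          solutionWhile m2 base f (PySem.Int.floordiv num base)
            (m2.getD (PySem.Int.mod num base) "" ++ ans)
        else ans := rfl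

-- A's while loop renders a bounded digit list as B's join over the zero-stripped list
theorem renderLoop (rule : List String) (m2 : PySem.Dict Int String) (base : Int)
    (hb : 2 ≤ base)
    (hm2 : ∀ d : Int, 0 ≤ d → d < base → m2.getD d "" = (PySem.List.pyGet? rule d).getD "") :
    ∀ (ds : List Int), (∀ d ∈ ds, 0 ≤ d ∧ d < base) →
    ∀ (fuel : Nat), (nuv base ds).toNat ≤ fuel → ∀ (ans : String),
    solutionWhile m2 base fuel (nuv base ds) ans
      = PySem.Str.join "" ((altDropZeros ds).map (fun d => (PySem.List.pyGet? rule d).getD "")) ++ ans := by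
  intro ds
  induction ds using List.reverseRecOn with
  | nil =>
    intro _ fuel _ ans
    have h0 : nuv base [] = 0 := rfl
    rw [h0]
    have hdz : altDropZeros [] = [] := rfl
    rw [hdz]
    simp only [List.map_nil, join_nil_nil, String.empty_append]
    cases fuel with
    | zero => rfl
    | succ f => rw [solutionWhile_succ, if_neg (by omega)]
  | append_singleton l d ihl =>
    intro hds fuel hfuel ans
    obtain ⟨hd0, hd1⟩ := hds d (by simp)
    have hl := fun x hx => hds x (List.mem_append.mpr (Or.inl hx))
    have hb0 : (0:Int) < base := by omega
    have hv : nuv base (l ++ [d]) = nuv base l * base + d := nuv_append base l d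
    obtain ⟨hl0, _⟩ := nuv_bounds base l hl
    obtain ⟨hv0, _⟩ := nuv_bounds base (l ++ [d]) hds
    by_cases hz : nuv base (l ++ [d]) = 0
    · have hall : ∀ x ∈ l ++ [d], x = 0 := (nuv_eq_zero_iff base _ hb0 hds).mp hz
      have hdz : altDropZeros (l ++ [d]) = [] := (dropZeros_eq_nil_iff _).mpr hall
      rw [hz, hdz]
      simp only [List.map_nil, join_nil_nil, String.empty_append]
      cases fuel with
      | zero => rfl
      | succ f => rw [solutionWhile_succ, if_neg (by omega)]
    · have hpos : 0 < nuv base (l ++ [d]) := lt_of_le_of_ne hv0 (Ne.symm hz)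
      cases fuel with
      | zero => exfalso; omega
      | succ f =>
        rw [solutionWhile_succ, if_pos hpos]
        have hmod : PySem.Int.mod (nuv base (l ++ [d])) base = d := by
          rw [PySem.Int.mod_eq_emod_of_pos hb0]
          rw [show nuv base (l ++ [d]) = d + base * nuv base l by rw [hv]; ring]
          rw [Int.add_mul_emod_self_left]
          exact Int.emod_eq_of_lt hd0 hd1
        have hdiv : PySem.Int.floordiv (nuv base (l ++ [d])) base = nuv base l := by
          rw [PySem.Int.floordiv_eq_ediv_of_pos hb0]
          rw [show nuv base (l ++ [d]) = d + base * nuv base l by rw [hv]; ring]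
          rw [Int.add_mul_ediv_left _ _ (ne_of_gt hb0)]
          rw [Int.ediv_eq_zero_of_lt hd0 hd1]
          simp
        have hlt : nuv base l < nuv base (l ++ [d]) := by
          have h1 : 0 ≤ nuv base l * (base - 1) := mul_nonneg hl0 (by omega)
          have h2 : nuv base (l ++ [d]) = nuv base l + (nuv base l * (base - 1) + d) := by
            rw [hv]; ring
          have h3 : 0 < nuv base l * (base - 1) + d := by
            by_contra hcon
            push_neg at hcon
            have he : nuv base l * (base - 1) = 0 ∧ d = 0 := by constructor <;> linarith
            rcases mul_eq_zero.mp he.1 with hq | hq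
            · exact hz (by rw [hv, hq, he.2]; ring)
            · omega
          linarith
        have hfl : (nuv base l).toNat ≤ f := by
          have h5 : ∀ A B : Int, 0 ≤ A → A < B → A.toNat < B.toNat := by
            intro A B h1 h2; omega
          exact Nat.le_of_lt_succ (Nat.lt_of_lt_of_le (h5 _ _ hl0 hlt) hfuel)
        rw [hmod, hdiv]
        rw [ihl hl f hfl _]
        rw [hm2 d hd0 hd1]
        rw [dropZeros_append]
        by_cases hnil : altDropZeros l = []
        · have hnl : nuv base l = 0 := by
            rw [← nuv_dropZeros base l, hnil]; rfl
          have hdne : d ≠ 0 := by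
            intro hdz
            exact hz (by rw [hv, hnl, hdz]; ring)
          rw [if_pos hnil, hnil]
          have : altDropZeros [d] = [d] := by simp [altDropZeros, hdne]
          rw [this]
          simp only [List.map_nil, List.map_cons, join_nil_nil, String.empty_append,
            join_nil_singleton]
        · rw [if_neg hnil]
          rw [List.map_append]
          simp only [List.map_cons, List.map_nil]
          rw [join_nil_append]
          rw [String.append_assoc]

-- right-to-left fold with a running power is Horner evaluation
theorem convA (base : Int) (ws : List Int) : ∀ (a an : Int),
    ws.reverse.foldl (fun (s : Int × Int) w => (s.1 + w * s.2, s.2 * base)) (a, an)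
      = (a + nuv base ws * an, an * base ^ ws.length) := by
  induction ws using List.reverseRecOn with
  | nil => intro a an; simp [nuv]
  | append_singleton l d ih =>
    intro a an
    rw [List.reverse_append]
    simp only [List.reverse_singleton, List.singleton_append, List.foldl_cons]
    rw [ih]
    rw [nuv_append]
    refine Prod.ext ?_ ?_ <;> simp [pow_succ] <;> ring

-- A's right-to-left conversion loop computes the Horner value of the digit list
theorem convLoopGen (base : Int) (cs : List Char) (dig : Char → Int) :
    ((PySem.List.pyRange ((cs.length : Int) - 1) (-1) (-1)).foldl
      (fun (s : Int × Int) i =>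
        (s.1 + dig ((PySem.List.pyGet? cs i).getD ' ') * s.2, s.2 * base)) ((0:Int), (1:Int))).1
      = nuv base (cs.map dig) := by
  have h1 : PySem.List.pyRange ((cs.length : Int) - 1) (-1) (-1)
      = (PySem.List.pyRange 0 (cs.length : Int)).reverse := by
    rw [PySem.List.pyRange_neg_one_eq_reverse]
    norm_num
  rw [h1]
  have h2 : ∀ (l : List Int) (init : Int × Int),
      l.foldl (fun (s : Int × Int) i =>
        (s.1 + dig ((PySem.List.pyGet? cs i).getD ' ') * s.2, s.2 * base)) init
      = (l.map (fun i => dig (PySem.List.pyGetD cs i ' '))).foldl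
          (fun (s : Int × Int) w => (s.1 + w * s.2, s.2 * base)) init := by
    intro l init
    rw [List.foldl_map]
    rfl
  rw [h2]
  rw [List.map_reverse]
  rw [show (PySem.List.pyRange 0 (cs.length : Int)).map (fun i => dig (PySem.List.pyGetD cs i ' '))
      = cs.map dig from ?_]
  · rw [convA]
    simp
  · have h3 : (PySem.List.pyRange 0 (cs.length : Int)).map (fun i => dig (PySem.List.pyGetD cs i ' '))
        = ((PySem.List.pyRange 0 (cs.length : Int)).map (fun i => PySem.List.pyGetD cs i ' ')).map dig := by
      rw [List.map_map]; rfl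
    rw [h3, PySem.List.map_pyGetD_pyRange_zero']

-- the same, phrased on the dict lookup the ports write
theorem convLoop (base : Int) (cs : List Char) (m1 : PySem.Dict String Int) :
    ((PySem.List.pyRange ((cs.length : Int) - 1) (-1) (-1)).foldl
      (fun (s : Int × Int) i =>
        (s.1 + m1.getD (String.ofList [((PySem.List.pyGet? cs i).getD ' ')]) 0 * s.2, s.2 * base)) ((0:Int), (1:Int))).1
      = nuv base (cs.map (fun c => m1.getD (String.ofList [c]) 0)) :=
  convLoopGen base cs (fun c => m1.getD (String.ofList [c]) 0)

-- every value stored by the enumerate-insert loop is a position below N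
theorem dictBound (N : Int) : ∀ (l : List (Int × String)) (d : PySem.Dict String Int),
    (∀ k, 0 ≤ d.getD k 0 ∧ d.getD k 0 < N) → (∀ p ∈ l, 0 ≤ p.1 ∧ p.1 < N) →
    ∀ k, 0 ≤ (l.foldl (fun d p => d.insert p.2 p.1) d).getD k 0 ∧
         (l.foldl (fun d p => d.insert p.2 p.1) d).getD k 0 < N := by
  intro l
  induction l with
  | nil => intro d hd _ k; exact hd k
  | cons p t ih =>
    intro d hd hl k
    refine ih (d.insert p.2 p.1) ?_ (fun q hq => hl q (List.mem_cons_of_mem _ hq)) k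
    intro k'
    rw [PySem.Dict.getD_insert]
    split
    · exact hl p (by simp)
    · exact hd k'

-- the digit → symbol dict of A looks up rule[d]
theorem m2Lookup (rule : List String) (d : Int) (h0 : 0 ≤ d) (h1 : d < (rule.length : Int)) :
    ((PySem.List.enumerate rule).foldl (fun m p => m.insert p.1 p.2) PySem.Dict.empty).getD d ""
      = (PySem.List.pyGet? rule d).getD "" := by
  have hfresh : ∀ a ∈ PySem.List.enumerate rule 0, (PySem.Dict.empty : PySem.Dict Int String).contains a.1 = false := by
    intro a _; simp [PySem.Dict.contains_empty]
  have hnd : ((PySem.List.enumerate rule 0).map (fun p => p.1)).Nodup := by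
    rw [PySem.List.map_fst_enumerate]
    exact PySem.List.nodup_pyRange_one _ _
  have hitems := PySem.Dict.items_foldl_insert_fresh (PySem.List.enumerate rule 0)
      (fun p => p.1) (fun p => p.2) PySem.Dict.empty hfresh hnd
  set D := (PySem.List.enumerate rule 0).foldl (fun m p => m.insert p.1 p.2) PySem.Dict.empty with hD
  have hitems' : D.items = PySem.List.enumerate rule 0 := by
    simpa using hitems
  have hmem : (d, rule[d.toNat]'(by omega)) ∈ D.items := by
    rw [hitems', PySem.List.mem_enumerate_iff]
    exact ⟨d.toNat, by omega, by simp; omega⟩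
  have hkeys : D.keys.Nodup := by
    have hk : D.keys = D.items.map (fun p => p.1) := rfl
    rw [hk, hitems']
    exact hnd
  rw [PySem.Dict.getD_of_mem_items D hmem hkeys]
  rw [PySem.List.pyGet?_eq_some_getElem rule (by omega) (by omega)]
  rfl

-- ===== VERDICT (by name: the statement is the Claim_ definition above) =====
theorem solution_spec : Claim_equal_solution := by
  unfold Claim_equal_solution
  intro rule A B hDom hPre
  unfold Spec_solution
  obtain ⟨hrule, _⟩ := hPre
  by_cases h : A = B
  · simp [solution, solution_alt, h]
  · have hBeq : (A == B) = false := by simp [h]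
    simp only [solution, solution_alt, hBeq, Bool.false_eq_true, if_false]
    rw [PySem.List.foldl_prod_mk (f := fun (d : PySem.Dict String Int) (ir : Int × String) => d.insert ir.2 ir.1)
        (g := fun (d : PySem.Dict Int String) (ir : Int × String) => d.insert ir.1 ir.2)]
    set n := rule.length with hn
    have hn0 : 0 < n := List.length_pos_iff.mpr hrule
    set base : Int := (n : Int) with hbase
    have hb1 : (1:Int) ≤ base := by omega
    set m1 := (PySem.List.enumerate rule 0).foldl
        (fun (d : PySem.Dict String Int) (p : Int × String) => d.insert p.2 p.1) PySem.Dict.empty with hm1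
    set m2 := (PySem.List.enumerate rule 0).foldl
        (fun (d : PySem.Dict Int String) (p : Int × String) => d.insert p.1 p.2) PySem.Dict.empty with hm2def
    have hdig : ∀ k, 0 ≤ m1.getD k 0 ∧ m1.getD k 0 < base := by
      apply dictBound base (PySem.List.enumerate rule 0) PySem.Dict.empty
      · intro k
        simp [PySem.Dict.getD_empty]
        omega
      · intro p hp
        rw [PySem.List.mem_enumerate_iff] at hp
        obtain ⟨k, hk, rfl⟩ := hp
        constructor
        · omega
        · simp only [hbase, hn]
          omega
    simp only [PySem.Str.len_eq, PySem.Str.pyGet?_eq, PySem.Chars.pyGet?_eq_listPyGet?]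
    rw [convLoop base A.toList m1, convLoop base B.toList m1]
    set da0 := A.toList.map (fun c => m1.getD (String.ofList [c]) 0) with hda0
    set db0 := B.toList.map (fun c => m1.getD (String.ofList [c]) 0) with hdb0
    have hda0B : ∀ d ∈ da0, 0 ≤ d ∧ d < base := by
      intro d hd
      rw [hda0, List.mem_map] at hd
      obtain ⟨c, _, rfl⟩ := hd
      exact hdig _
    have hdb0B : ∀ d ∈ db0, 0 ≤ d ∧ d < base := by
      intro d hd
      rw [hdb0, List.mem_map] at hd
      obtain ⟨c, _, rfl⟩ := hd
      exact hdig _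
    set sa := altDropZeros da0 with hsa
    set sb := altDropZeros db0 with hsb
    have hsaB : ∀ d ∈ sa, 0 ≤ d ∧ d < base := fun d hd => hda0B d (dropZeros_sub _ d hd)
    have hsbB : ∀ d ∈ sb, 0 ≤ d ∧ d < base := fun d hd => hdb0B d (dropZeros_sub _ d hd)
    have hnumEq : nuv base da0 - nuv base db0 = nuv base sa - nuv base sb := by
      rw [hsa, hsb, nuv_dropZeros, nuv_dropZeros]
    have hguard := guard_iff base (by omega) sa sb hsaB hsbB (dropZeros_head da0) (dropZeros_head db0)
    by_cases hg : (decide (sa.length < sb.length) || (sa.length == sb.length && altLexLe sa sb)) = true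
    · rw [if_pos hg]
      have hle : nuv base sa ≤ nuv base sb := hguard.mp hg
      have hzero : (nuv base da0 - nuv base db0).toNat = 0 := by omega
      rw [hzero, solutionWhile_zero]
    · rw [if_neg hg]
      have hlt : nuv base sb < nuv base sa := by
        rcases lt_or_ge (nuv base sb) (nuv base sa) with hx | hx
        · exact hx
        · exact absurd (hguard.mpr hx) hg
      have hpos : 0 < nuv base da0 - nuv base db0 := by omega
      have hlen : sb.length ≤ sa.length := by
        by_contra hcon
        push_neg at hcon
        exact hg (by simp [hcon])
      set db2 := List.replicate (sa.length - sb.length) (0:Int) ++ sb with hdb2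
      have hdb2len : db2.length = sa.length := by
        rw [hdb2]; simp; omega
      have hdb2B : ∀ d ∈ db2, 0 ≤ d ∧ d < base := by
        intro d hd
        rw [hdb2, List.mem_append] at hd
        rcases hd with hd | hd
        · rw [List.eq_of_mem_replicate hd]
          constructor <;> omega
        · exact hsbB d hd
      have hdb2v : nuv base db2 = nuv base sb := nuv_replicate_zero base _ sb
      rw [fold_eq_subSpec]
      set zs := sa.reverse.zip db2.reverse with hzs
      have hzslen : zs.length = sa.length := by
        rw [hzs]
        simp [hdb2len]
      have hzsB : ∀ p ∈ zs, (0 ≤ p.1 ∧ p.1 < base) ∧ (0 ≤ p.2 ∧ p.2 < base) := by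
        intro p hp
        rw [hzs] at hp
        obtain ⟨h1, h2⟩ := List.of_mem_zip (by rw [show p = (p.1, p.2) from rfl] at hp; exact hp)
        exact ⟨hsaB _ (List.mem_reverse.mp h1), hdb2B _ (List.mem_reverse.mp h2)⟩
      obtain ⟨hrsB, hbo, hrslen, hrsval⟩ := subSpec_props base zs 0 (Or.inl rfl) hzsB
      set rs := (subSpec base zs 0).1 with hrs
      set bo := (subSpec base zs 0).2 with hbo2
      have hfst : zs.map (fun p => p.1) = sa.reverse := by
        rw [hzs]
        exact List.map_fst_zip (by simp [hdb2len])
      have hsnd : zs.map (fun p => p.2) = db2.reverse := by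
        rw [hzs]
        exact List.map_snd_zip (by simp [hdb2len])
      have hrsval' : muv base rs = nuv base sa - nuv base db2 + bo * base ^ zs.length := by
        rw [hrsval, hfst, hsnd, muv_reverse, muv_reverse]
        ring
      have hbo0 : bo = 0 := by
        rcases hbo with hb0 | hb0
        · exact hb0
        · exfalso
          obtain ⟨_, hmub⟩ := muv_bounds base rs hrsB
          rw [hrslen] at hmub
          have hp : (0:Int) < base ^ zs.length := pow_pos (by omega) _
          rw [hrsval', hdb2v, hb0] at hmub
          nlinarith
      have hnum2 : nuv base (rs.reverse) = nuv base da0 - nuv base db0 := by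
        rw [nuv_reverse, hrsval', hbo0, hdb2v, hnumEq]
        ring
      have hrevB : ∀ d ∈ rs.reverse, 0 ≤ d ∧ d < base := by
        intro d hd
        exact hrsB d (List.mem_reverse.mp hd)
      have hb2 : (2:Int) ≤ base := by
        have hsane : sa ≠ [] := by
          intro hnil
          rw [hnil] at hlt
          rw [show nuv base ([] : List Int) = 0 from rfl] at hlt
          have := (nuv_bounds base sb hsbB).1
          linarith
        rcases dropZeros_head da0 with hc | ⟨d0, t0, hc, hd0⟩
        · exact absurd hc hsane
        · obtain ⟨h1, h2⟩ := hsaB d0 (by rw [← hsa] at hc; rw [hc]; simp)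
          omega
      have hm2L : ∀ d : Int, 0 ≤ d → d < base → m2.getD d "" = (PySem.List.pyGet? rule d).getD "" := by
        intro d h0 h1
        exact m2Lookup rule d h0 h1
      have hren := renderLoop rule m2 base hb2 hm2L rs.reverse hrevB
          (nuv base da0 - nuv base db0).toNat (by rw [hnum2]) ""
      rw [hnum2] at hren
      rw [hren]
      simp only [List.nil_append]
      exact String.append_empty
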